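-- pv_equiv track=rewrite | github.com/17rohith29/Google-Code-Jam-2018-Qualification-Round | problem2.py | canT
-- ===== SOURCE A (Python) =====
-- def tsort(lst):# O(n)
--     done = False
--     while not done:
--         done = True
--         for i in range(0, len(lst)-2):
--             if lst[i] > lst[i+2]:
--                 done = False
--                 temp = lst[i+2]
--                 lst[i+2] = lst[i]
--                 lst[i] = temp
--
-- def canT(lst):#o(n)
--     ok = True
--     tsort(lst)
--
--     for i in range(0, len(lst)-1):
--         if lst[i] > lst[i+1]:
--             return i
--             break
--     return -1 if ok else -100
-- ===== SOURCE B (Python) =====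
-- def canT(lst):
--     ev = sorted(lst[::2])
--     od = sorted(lst[1::2])
--     merged = []
--     for a, b in zip(ev, od):
--         merged.append(a)
--         merged.append(b)
--     if len(ev) > len(od):
--         merged.append(ev[-1])
--     for i in range(len(merged) - 1):
--         if merged[i] > merged[i + 1]:
--             return i
--     return -1
-- ===== Notes on version B (the rewrite author's own statement) =====
-- stated objective: faster
-- what changed: A repeatedly runs O(n^2) trouble-sort swap passes until a fixpoint and then scans; B sorts the even- and odd-indexed subsequences once with sorted(), interleaves them, and scans once for the first inversion.
import Mathlib
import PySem

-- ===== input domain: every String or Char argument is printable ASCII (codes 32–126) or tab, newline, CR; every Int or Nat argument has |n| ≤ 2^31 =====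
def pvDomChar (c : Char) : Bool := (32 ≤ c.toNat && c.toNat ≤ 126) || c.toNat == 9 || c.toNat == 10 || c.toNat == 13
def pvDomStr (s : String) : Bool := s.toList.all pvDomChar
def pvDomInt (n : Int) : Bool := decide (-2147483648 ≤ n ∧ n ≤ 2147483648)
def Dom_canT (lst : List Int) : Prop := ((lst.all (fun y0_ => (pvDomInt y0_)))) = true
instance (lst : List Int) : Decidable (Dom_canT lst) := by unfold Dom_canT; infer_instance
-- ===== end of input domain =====

-- B replaces A's quadratic repeated trouble-sort passes by sorting the even- and odd-indexed
-- subsequences once and scanning the interleaving for the first inversion (objective: faster).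
-- Python A mutates its argument in place (tsort); the equivalence proved here is about the
-- RETURN value only — B does not mutate.

-- ===== PORT A =====
-- one 'for i in range(0, len(lst)-2)' pass of tsort; state = (list, done);
-- indices i, i+2 are always in range, so pyGetD/pySetD are exact here
def tsortPass (l : List Int) : List Int × Bool :=
  (PySem.List.pyRange 0 ((l.length : Int) - 2) 1).foldl
    (fun st i =>
      if PySem.List.pyGetD st.1 i 0 > PySem.List.pyGetD st.1 (i + 2) 0 then
        ((PySem.List.pySetD (PySem.List.pySetD st.1 (i + 2) (PySem.List.pyGetD st.1 i 0)) i
            (PySem.List.pyGetD st.1 (i + 2) 0)), false)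
      else st)
    (l, true)

-- 'while not done': fuel is only a totality guard; the lemmas below prove
-- lst.length^2 + 1 passes always reach the fixpoint the Python loop stops at
def tsortLoop : Nat → List Int → List Int
  | 0, l => l
  | f + 1, l =>
      let p := tsortPass l
      if p.2 then p.1 else tsortLoop f p.1

def canT (lst : List Int) : Int :=
  let l := tsortLoop (lst.length * lst.length + 1) lst
  match (PySem.List.pyRange 0 ((l.length : Int) - 1) 1).find?
      (fun i => PySem.List.pyGetD l i 0 > PySem.List.pyGetD l (i + 1) 0) with
  | some i => i
  | none => -1

-- ===== PORT B =====
def canT_alt (lst : List Int) : Int :=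
  let eo := (PySem.List.enumerate lst 0).foldl
      (fun (st : List Int × List Int) ix =>
        if PySem.Int.mod ix.1 2 == 0 then (st.1 ++ [ix.2], st.2) else (st.1, st.2 ++ [ix.2]))
      ([], [])
  let ev := PySem.List.sorted eo.1 (fun x => x) false
  let od := PySem.List.sorted eo.2 (fun x => x) false
  let m0 := (ev.zip od).foldl (fun m p => m ++ [p.1, p.2]) []
  let merged := if od.length < ev.length then m0 ++ [PySem.List.pyGetD ev (-1) 0] else m0
  match (PySem.List.pyRange 0 ((merged.length : Int) - 1) 1).find?
      (fun i => PySem.List.pyGetD merged i 0 > PySem.List.pyGetD merged (i + 1) 0) with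
  | some i => i
  | none => -1

-- ===== PRECONDITION & SPEC =====
def Spec_canT (lst : List Int) (out : Int) : Prop := out = canT_alt lst
instance (lst : List Int) (out : Int) : Decidable (Spec_canT lst out) := by unfold Spec_canT; infer_instance

-- ===== CLAIM (what is proved, stated in full; the proofs are below) =====
def Claim_equal_canT : Prop := ∀ (lst : List Int), Dom_canT lst → Spec_canT lst (canT lst)

-- ===== LEMMAS AND PROOFS =====

-- even-/odd-indexed subsequences and their interleaving
def pvEvens : List Int → List Int
  | [] => []
  | [x] => [x]
  | x :: _ :: t => x :: pvEvens t

def pvOdds (l : List Int) : List Int := pvEvens l.tail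

def pvInterleave : List Int → List Int → List Int
  | [], ys => ys
  | x :: xs, ys => x :: pvInterleave ys xs
termination_by xs ys => xs.length + ys.length

-- one bubble pass over one parity class, with the 'a swap happened' flag
def pvBPass : List Int → List Int × Bool
  | a :: b :: t =>
      if a > b then (b :: (pvBPass (a :: t)).1, false)
      else (a :: (pvBPass (b :: t)).1, (pvBPass (b :: t)).2)
  | l => (l, true)

-- inversion count
def pvInvc : List Int → Nat
  | [] => 0
  | a :: t => t.countP (fun y => decide (y < a)) + pvInvc t

lemma pvInterleave_cons (x : Int) (xs ys : List Int) :
    pvInterleave (x :: xs) ys = x :: pvInterleave ys xs := by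
  simp [pvInterleave]

lemma pvEvens_cons (x : Int) (t : List Int) : pvEvens (x :: t) = x :: pvOdds t := by
  cases t <;> simp [pvEvens, pvOdds]

lemma pvOdds_cons (x : Int) (t : List Int) : pvOdds (x :: t) = pvEvens t := rfl

lemma pvInterleave_evens_odds (l : List Int) :
    pvInterleave (pvEvens l) (pvOdds l) = l := by
  induction l using pvEvens.induct with
  | case1 => simp [pvEvens, pvOdds, pvInterleave]
  | case2 x => simp [pvEvens, pvOdds, pvInterleave]
  | case3 x y t ih =>
      rw [pvEvens_cons, pvInterleave_cons, pvOdds_cons, pvEvens_cons, pvInterleave_cons,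
        pvOdds_cons, ih]

lemma pvLength_odds_le (l : List Int) :
    (pvOdds l).length ≤ (pvEvens l).length ∧ (pvEvens l).length ≤ (pvOdds l).length + 1 := by
  induction l using pvEvens.induct with
  | case1 => simp [pvEvens, pvOdds]
  | case2 x => simp [pvEvens, pvOdds]
  | case3 x y t ih =>
      rw [pvEvens_cons, pvOdds_cons, pvEvens_cons, pvOdds_cons]
      simpa using ih

lemma pvBPass_perm (l : List Int) : (pvBPass l).1.Perm l := by
  induction l using pvBPass.induct with
  | case1 a b t hab ih =>
      simp only [pvBPass, if_pos hab]
      exact (ih.cons b).trans (List.Perm.swap a b t)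
  | case2 a b t hab ih =>
      simp only [pvBPass, if_neg hab]
      exact ih.cons a
  | case3 l h1 => simp [pvBPass]

lemma pvBPass_length (l : List Int) : (pvBPass l).1.length = l.length :=
  (pvBPass_perm l).length_eq

lemma pvBPass_true_fix (l : List Int) (h : (pvBPass l).2 = true) : (pvBPass l).1 = l := by
  induction l using pvBPass.induct with
  | case1 a b t hab ih => simp [pvBPass, if_pos hab] at h
  | case2 a b t hab ih =>
      simp only [pvBPass, if_neg hab] at h ⊢
      simp [ih h]
  | case3 l h1 => simp [pvBPass]

lemma pvBPass_true_pairwise (l : List Int) (h : (pvBPass l).2 = true) :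
    l.Pairwise (· ≤ ·) := by
  induction l using pvBPass.induct with
  | case1 a b t hab ih => simp [pvBPass, if_pos hab] at h
  | case2 a b t hab ih =>
      simp only [pvBPass, if_neg hab] at h
      have hp := ih h
      have hab' : a ≤ b := le_of_not_gt hab
      refine List.Pairwise.cons ?_ hp
      intro y hy
      rcases List.mem_cons.1 hy with rfl | hy'
      · exact hab'
      · exact le_trans hab' ((List.pairwise_cons.1 hp).1 y hy')
  | case3 l h1 =>
      rcases l with _ | ⟨x, _ | ⟨y, t⟩⟩
      · simp
      · simp
      · exact absurd rfl (h1 x y t)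

lemma pvInvc_cons (a : Int) (t : List Int) :
    pvInvc (a :: t) = t.countP (fun y => decide (y < a)) + pvInvc t := rfl

lemma pvInvc_bpass_le (l : List Int) : pvInvc (pvBPass l).1 ≤ pvInvc l := by
  induction l using pvBPass.induct with
  | case1 a b t hab ih =>
      simp only [pvBPass, if_pos hab]
      have e1 : List.countP (fun y => decide (y < b)) (pvBPass (a :: t)).1
          = List.countP (fun y => decide (y < b)) t := by
        rw [(pvBPass_perm (a :: t)).countP_eq, List.countP_cons]
        have hnb : ¬ (a < b) := by omega
        simp [hnb]
      have e2 : List.countP (fun y => decide (y < a)) (b :: t)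
          = List.countP (fun y => decide (y < a)) t + 1 := by
        rw [List.countP_cons]
        simp [show b < a from hab]
      simp only [pvInvc_cons, e1, e2] at *
      omega
  | case2 a b t hab ih =>
      simp only [pvBPass, if_neg hab]
      have e1 : List.countP (fun y => decide (y < a)) (pvBPass (b :: t)).1
          = List.countP (fun y => decide (y < a)) (b :: t) :=
        (pvBPass_perm (b :: t)).countP_eq _
      simp only [pvInvc_cons, e1] at *
      omega
  | case3 l h1 => simp [pvBPass]

lemma pvInvc_bpass_lt (l : List Int) (h : (pvBPass l).2 = false) :
    pvInvc (pvBPass l).1 < pvInvc l := by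
  induction l using pvBPass.induct with
  | case1 a b t hab ih =>
      simp only [pvBPass, if_pos hab]
      have hle := pvInvc_bpass_le (a :: t)
      have e1 : List.countP (fun y => decide (y < b)) (pvBPass (a :: t)).1
          = List.countP (fun y => decide (y < b)) t := by
        rw [(pvBPass_perm (a :: t)).countP_eq, List.countP_cons]
        have hnb : ¬ (a < b) := by omega
        simp [hnb]
      have e2 : List.countP (fun y => decide (y < a)) (b :: t)
          = List.countP (fun y => decide (y < a)) t + 1 := by
        rw [List.countP_cons]
        simp [show b < a from hab]
      simp only [pvInvc_cons, e1, e2] at *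
      omega
  | case2 a b t hab ih =>
      simp only [pvBPass, if_neg hab] at h ⊢
      have hlt := ih h
      have e1 : List.countP (fun y => decide (y < a)) (pvBPass (b :: t)).1
          = List.countP (fun y => decide (y < a)) (b :: t) :=
        (pvBPass_perm (b :: t)).countP_eq _
      simp only [pvInvc_cons, e1] at *
      omega
  | case3 l h1 =>
      exfalso
      rcases l with _ | ⟨x, _ | ⟨y, t⟩⟩
      · simp [pvBPass] at h
      · simp [pvBPass] at h
      · exact absurd rfl (h1 x y t)

lemma pvInvc_le_sq (l : List Int) : pvInvc l ≤ l.length * l.length := by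
  induction l with
  | nil => simp [pvInvc]
  | cons a t ih =>
      have h1 : t.countP (fun y => decide (y < a)) ≤ t.length := List.countP_le_length
      simp only [pvInvc_cons, List.length_cons]
      nlinarith

-- Nat-index form of one tsort pass
def pvStep (st : List Int × Bool) (i : Nat) : List Int × Bool :=
  if st.1.getD i 0 > st.1.getD (i + 2) 0 then
    ((st.1.set (i + 2) (st.1.getD i 0)).set i (st.1.getD (i + 2) 0), false)
  else st

def pvPassGo (n : Nat) (st : List Int × Bool) : List Int × Bool :=
  (List.range n).foldl pvStep st

lemma tsortPass_eq (l : List Int) : tsortPass l = pvPassGo (l.length - 2) (l, true) := by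
  unfold tsortPass pvPassGo
  rw [PySem.List.pyRange_one, List.foldl_map]
  have hn : (((l.length : Int) - 2) - 0).toNat = l.length - 2 := by omega
  rw [hn]
  apply PySem.List.foldl_congr_mem
  intro st k _
  have hc : ((k : Int) + 2) = ((k + 2 : Nat) : Int) := by push_cast; ring
  have e1 : PySem.List.pyGetD st.1 ((0 : Int) + k) 0 = st.1.getD k 0 := by
    rw [zero_add, PySem.List.pyGetD_natCast]
  have e2 : PySem.List.pyGetD st.1 ((0 : Int) + k + 2) 0 = st.1.getD (k + 2) 0 := by
    rw [zero_add, hc, PySem.List.pyGetD_natCast]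
  have e3 : ∀ v : Int, PySem.List.pySetD st.1 ((0 : Int) + k + 2) v = st.1.set (k + 2) v := by
    intro v; rw [zero_add, hc, PySem.List.pySetD_natCast]
  have e4 : ∀ (L : List Int) (v : Int), PySem.List.pySetD L ((0 : Int) + k) v = L.set k v := by
    intro L v; rw [zero_add, PySem.List.pySetD_natCast]
  simp only [pvStep, e1, e2, e3, e4]

lemma pvStep_zero (a b c : Int) (T : List Int) (d : Bool) :
    pvStep (a :: b :: c :: T, d) 0 = if a > c then (c :: b :: a :: T, false) else (a :: b :: c :: T, d) := by
  by_cases h : a > c <;> simp [pvStep, h, List.getD]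

lemma pvStep_shift (x : Int) (st : List Int × Bool) (k : Nat) :
    pvStep (x :: st.1, st.2) (k + 1) = (x :: (pvStep st k).1, (pvStep st k).2) := by
  have hk : k + 1 + 2 = (k + 2) + 1 := by ring
  have g1 : (x :: st.1).getD (k + 1) 0 = st.1.getD k 0 := by simp [List.getD]
  have g2 : (x :: st.1).getD (k + 1 + 2) 0 = st.1.getD (k + 2) 0 := by simp [hk, List.getD]
  have s1 : ∀ v : Int, (x :: st.1).set (k + 1 + 2) v = x :: st.1.set (k + 2) v := by
    intro v; simp [hk]
  have s2 : ∀ (L : List Int) (v : Int), (x :: L).set (k + 1) v = x :: L.set k v := by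
    intro L v; simp
  by_cases h : st.1.getD k 0 > st.1.getD (k + 2) 0
  · simp only [pvStep, g1, g2, s1, s2, if_pos h]
  · simp only [pvStep, g1, g2, s1, s2, if_neg h]

lemma pvFoldl_map_succ (n : Nat) (x : Int) (t : List Int) (d : Bool) :
    ((List.range n).map (· + 1)).foldl pvStep (x :: t, d)
      = (x :: ((List.range n).foldl pvStep (t, d)).1, ((List.range n).foldl pvStep (t, d)).2) := by
  induction n with
  | zero => simp
  | succ n ih =>
      rw [List.range_succ]
      simp only [List.map_append, List.map_cons, List.map_nil, List.foldl_append, List.foldl_cons,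
        List.foldl_nil, ih]
      exact pvStep_shift x ((List.range n).foldl pvStep (t, d)) n

lemma pvPassGo_interleave : ∀ (N : Nat) (e o : List Int) (d : Bool),
    e.length + o.length ≤ N → o.length ≤ e.length → e.length ≤ o.length + 1 →
    pvPassGo (e.length + o.length - 2) (pvInterleave e o, d)
      = (pvInterleave (pvBPass e).1 (pvBPass o).1, d && (pvBPass e).2 && (pvBPass o).2) := by
  intro N
  induction N with
  | zero =>
      intro e o d hN h1 h2
      rcases e with _ | ⟨a, e'⟩
      · rcases o with _ | ⟨b, o'⟩
        · simp [pvPassGo, pvBPass, pvInterleave]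
        · simp at hN
      · simp at hN
  | succ N ih =>
      intro e o d hN h1 h2
      rcases e with _ | ⟨a, _ | ⟨a2, e'⟩⟩
      · -- e = [] forces o = []
        have : o = [] := by
          cases o with
          | nil => rfl
          | cons b o' => simp at h1
        subst this
        simp [pvPassGo, pvBPass, pvInterleave]
      · -- e = [a]
        rcases o with _ | ⟨b, _ | ⟨b2, o''⟩⟩
        · simp [pvPassGo, pvBPass, pvInterleave]
        · simp [pvPassGo, pvBPass, pvInterleave]
        · simp at h1
      · -- e = a :: a2 :: e'
        rcases o with _ | ⟨b, o'⟩
        · simp at h2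
        · have hL : pvInterleave (a :: a2 :: e') (b :: o') = a :: b :: a2 :: pvInterleave o' e' := by
            rw [pvInterleave_cons, pvInterleave_cons, pvInterleave_cons]
          have hlen : (a :: a2 :: e').length + (b :: o').length - 2 = (e'.length + o'.length + 1) := by
            simp; omega
          rw [hlen, pvPassGo, List.range_succ_eq_map, List.foldl_cons, hL, pvStep_zero]
          have hmap : (List.range (e'.length + o'.length)).map Nat.succ
              = (List.range (e'.length + o'.length)).map (· + 1) := by
            simp
          by_cases hac : a > a2
          · rw [if_pos hac]
            rw [hmap, pvFoldl_map_succ]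
            have hI : b :: a :: pvInterleave o' e' = pvInterleave (b :: o') (a :: e') := by
              rw [pvInterleave_cons, pvInterleave_cons]
            rw [hI]
            have := ih (b :: o') (a :: e') false (by simp at hN ⊢; omega) (by simp; simp at h2; omega)
              (by simp; simp at h1; omega)
            rw [pvPassGo] at this
            have hlen2 : (b :: o').length + (a :: e').length - 2 = e'.length + o'.length := by
              simp
              omega
            rw [hlen2] at this
            rw [this]
            have hbe : pvBPass (a :: a2 :: e') = (a2 :: (pvBPass (a :: e')).1, false) := by
              simp [pvBPass, hac]
            rw [hbe, pvInterleave_cons]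
            simp
          · rw [if_neg hac]
            rw [hmap, pvFoldl_map_succ]
            have hI : b :: a2 :: pvInterleave o' e' = pvInterleave (b :: o') (a2 :: e') := by
              rw [pvInterleave_cons, pvInterleave_cons]
            rw [hI]
            have := ih (b :: o') (a2 :: e') d (by simp at hN ⊢; omega) (by simp; simp at h2; omega)
              (by simp; simp at h1; omega)
            rw [pvPassGo] at this
            have hlen2 : (b :: o').length + (a2 :: e').length - 2 = e'.length + o'.length := by
              simp
              omega
            rw [hlen2] at this
            rw [this]
            have hbe : pvBPass (a :: a2 :: e') = (a :: (pvBPass (a2 :: e')).1, (pvBPass (a2 :: e')).2) := by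
              simp [pvBPass, hac]
            rw [hbe, pvInterleave_cons]
            simp only [Prod.mk.injEq]
            refine ⟨trivial, ?_⟩
            cases d <;> cases hb1 : (pvBPass (b :: o')).2 <;> cases hb2 : (pvBPass (a2 :: e')).2 <;>
              simp

def pvS (l : List Int) : List Int := PySem.List.sorted l (fun x => x) false

lemma pvInterleave_length : ∀ (xs ys : List Int),
    (pvInterleave xs ys).length = xs.length + ys.length := by
  intro xs ys
  induction xs, ys using pvInterleave.induct with
  | case1 ys => simp [pvInterleave]
  | case2 x xs ys ih => simp [pvInterleave, ih]; omega

lemma tsortLoop_interleave : ∀ (f : Nat) (e o : List Int),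
    o.length ≤ e.length → e.length ≤ o.length + 1 → pvInvc e + pvInvc o < f →
    tsortLoop f (pvInterleave e o) = pvInterleave (pvS e) (pvS o) := by
  intro f
  induction f with
  | zero => intro e o _ _ h; omega
  | succ f ih =>
      intro e o h1 h2 hf
      have hinj : Function.Injective (fun x : Int => x) := fun _ _ h => h
      have hpass : tsortPass (pvInterleave e o)
          = (pvInterleave (pvBPass e).1 (pvBPass o).1, (pvBPass e).2 && (pvBPass o).2) := by
        rw [tsortPass_eq, pvInterleave_length]
        have := pvPassGo_interleave (e.length + o.length) e o true le_rfl h1 h2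
        rw [pvPassGo] at this
        simpa using this
      have hrec : ((pvBPass e).2 = false ∨ (pvBPass o).2 = false) →
          tsortLoop f (pvInterleave (pvBPass e).1 (pvBPass o).1)
            = pvInterleave (pvS e) (pvS o) := by
        intro hor
        have hlE := pvBPass_length e
        have hlO := pvBPass_length o
        have he := pvInvc_bpass_le e
        have ho := pvInvc_bpass_le o
        have hinv : pvInvc (pvBPass e).1 + pvInvc (pvBPass o).1 < f := by
          rcases hor with h | h
          · have := pvInvc_bpass_lt e h; omega
          · have := pvInvc_bpass_lt o h; omega
        rw [ih _ _ (by omega) (by omega) hinv]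
        unfold pvS
        rw [PySem.List.sorted_eq_sorted_of_perm _ _ _ hinj (pvBPass_perm e),
          PySem.List.sorted_eq_sorted_of_perm _ _ _ hinj (pvBPass_perm o)]
      rw [tsortLoop]
      simp only [hpass]
      cases hE : (pvBPass e).2 <;> cases hO : (pvBPass o).2 <;>
        simp only [Bool.and_true, Bool.and_false, reduceIte]
      · exact hrec (Or.inl hE)
      · exact hrec (Or.inl hE)
      · exact hrec (Or.inr hO)
      · rw [pvBPass_true_fix e hE, pvBPass_true_fix o hO]
        unfold pvS
        rw [PySem.List.sorted_id_eq_of_perm_of_pairwise e e (List.Perm.refl e) (pvBPass_true_pairwise e hE),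
          PySem.List.sorted_id_eq_of_perm_of_pairwise o o (List.Perm.refl o) (pvBPass_true_pairwise o hO)]

-- the common final scan
def pvScan (L : List Int) : Int :=
  match (PySem.List.pyRange 0 ((L.length : Int) - 1) 1).find?
      (fun i => PySem.List.pyGetD L i 0 > PySem.List.pyGetD L (i + 1) 0) with
  | some i => i
  | none => -1

lemma canT_eq_scan (lst : List Int) :
    canT lst = pvScan (pvInterleave (pvS (pvEvens lst)) (pvS (pvOdds lst))) := by
  have h := pvLength_odds_le lst
  have hlen : (pvEvens lst).length + (pvOdds lst).length = lst.length := by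
    conv_rhs => rw [← pvInterleave_evens_odds lst]
    rw [pvInterleave_length]
  have hinv : pvInvc (pvEvens lst) + pvInvc (pvOdds lst) < lst.length * lst.length + 1 := by
    have he := pvInvc_le_sq (pvEvens lst)
    have ho := pvInvc_le_sq (pvOdds lst)
    nlinarith
  have hloop := tsortLoop_interleave (lst.length * lst.length + 1)
    (pvEvens lst) (pvOdds lst) h.1 h.2 hinv
  rw [pvInterleave_evens_odds] at hloop
  show pvScan (tsortLoop (lst.length * lst.length + 1) lst) = _
  rw [hloop]

-- B side: the enumerate/parity split computes pvEvens and pvOdds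
lemma pvSplit_foldl : ∀ (xs : List Int) (s : Int) (A B : List Int),
    (PySem.List.enumerate xs s).foldl
        (fun (st : List Int × List Int) ix =>
          if PySem.Int.mod ix.1 2 == 0 then (st.1 ++ [ix.2], st.2) else (st.1, st.2 ++ [ix.2]))
        (A, B)
      = if s % 2 = 0 then (A ++ pvEvens xs, B ++ pvOdds xs)
        else (A ++ pvOdds xs, B ++ pvEvens xs) := by
  intro xs
  induction xs with
  | nil =>
      intro s A B
      simp only [PySem.List.enumerate, List.foldl_nil, pvEvens, pvOdds, List.tail_nil]
      split <;> simp
  | cons x t ih =>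
      intro s A B
      rw [PySem.List.enumerate_cons, List.foldl_cons]
      have hmod : PySem.Int.mod s 2 = s % 2 := PySem.Int.mod_eq_emod_of_pos (by omega)
      have hnext : ((s + 1) % 2 = 0) ↔ ¬ (s % 2 = 0) := by omega
      by_cases hs : s % 2 = 0
      · have hc : (PySem.Int.mod s 2 == 0) = true := by rw [hmod]; simpa using hs
        simp only [hc, if_pos]
        rw [ih (s + 1)]
        rw [if_neg (by omega), if_pos hs]
        rw [pvEvens_cons, pvOdds_cons]
        simp
      · have hc : (PySem.Int.mod s 2 == 0) = false := by rw [hmod]; simpa using hs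
        simp only [hc, Bool.false_eq_true, if_false]
        rw [ih (s + 1)]
        rw [if_pos (hnext.2 hs), if_neg hs]
        rw [pvEvens_cons, pvOdds_cons]
        simp

lemma pvFlat_interleave : ∀ (e o : List Int),
    o.length ≤ e.length → e.length ≤ o.length + 1 →
    (if o.length < e.length
      then List.flatMap (fun p : Int × Int => [p.1, p.2]) (e.zip o) ++ [PySem.List.pyGetD e (-1) 0]
      else List.flatMap (fun p : Int × Int => [p.1, p.2]) (e.zip o))
      = pvInterleave e o := by
  intro e
  induction e with
  | nil =>
      intro o h1 h2
      have : o = [] := List.length_eq_zero_iff.1 (by simpa using h1)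
      subst this
      simp [pvInterleave]
  | cons x e' ih =>
      intro o h1 h2
      rcases o with _ | ⟨y, o'⟩
      · have : e' = [] := by
          cases e' with
          | nil => rfl
          | cons a t => simp at h2
        subst this
        rw [if_pos (by simp)]
        rw [PySem.List.pyGetD_neg_one [x] 0 (by simp)]
        simp [pvInterleave]
      · have hcond : ((y :: o').length < (x :: e').length) ↔ (o'.length < e'.length) := by
          simp
        rw [pvInterleave_cons, pvInterleave_cons]
        rw [← ih o' (by simp at h1; omega) (by simp at h2; omega)]
        by_cases hlt : o'.length < e'.length
        · have he' : e' ≠ [] := by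
            intro h; subst h; simp at hlt
          have hlast : PySem.List.pyGetD (x :: e') (-1) 0 = PySem.List.pyGetD e' (-1) 0 := by
            rw [PySem.List.pyGetD_neg_one (x :: e') 0 (by simp),
              PySem.List.pyGetD_neg_one e' 0 he', List.getLast_cons he']
          rw [if_pos (hcond.2 hlt), if_pos hlt, hlast]
          simp
        · rw [if_neg (fun h => hlt (hcond.1 h)), if_neg hlt]
          simp

lemma canT_alt_eq_scan (lst : List Int) :
    canT_alt lst = pvScan (pvInterleave (pvS (pvEvens lst)) (pvS (pvOdds lst))) := by
  have h := pvLength_odds_le lst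
  simp only [canT_alt]
  rw [pvSplit_foldl lst 0 [] []]
  rw [if_pos (show (0:Int) % 2 = 0 from by norm_num)]
  dsimp only
  simp only [List.nil_append]
  rw [PySem.List.foldl_append_eq_flatMap]
  simp only [List.nil_append]
  have h1 : (PySem.List.sorted (pvOdds lst) (fun x => x) false).length
      ≤ (PySem.List.sorted (pvEvens lst) (fun x => x) false).length := by
    rw [PySem.List.length_sorted, PySem.List.length_sorted]; exact h.1
  have h2 : (PySem.List.sorted (pvEvens lst) (fun x => x) false).length
      ≤ (PySem.List.sorted (pvOdds lst) (fun x => x) false).length + 1 := by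
    rw [PySem.List.length_sorted, PySem.List.length_sorted]; exact h.2
  rw [pvFlat_interleave _ _ h1 h2]
  rfl

theorem canT_spec : Claim_equal_canT := by
  intro lst _
  unfold Spec_canT
  rw [canT_eq_scan, canT_alt_eq_scan]
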